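-- pv_equiv track=rewrite | github.com/Wpawlina/AGH-ITCS-Course | cwiczenia/while arkusz 2/wyrazCiagu7.py | zad
-- ===== SOURCE A (Python) =====
-- def zad(num):
--     a=3
--     n=1
--     while a<=num:
--         if num%a==0:
--             return True
--         n+=1
--         a=n*n+n+1
--     return False
-- ===== SOURCE B (Python) =====
-- def _is_form(d):
--     # binary search for n >= 1 with n*n + n + 1 == d
--     lo, hi = 1, d
--     while lo <= hi:
--         mid = (lo + hi) // 2
--         v = mid * mid + mid + 1
--         if v == d:
--             return True
--         if v < d:
--             lo = mid + 1
--         else: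
--             hi = mid - 1
--     return False
--
--
-- def zad(num):
--     if num < 3:
--         return False
--     i = 1
--     while i * i <= num:
--         if num % i == 0 and (_is_form(num // i) or _is_form(i)):
--             return True
--         i += 1
--     return False
-- ===== Notes on version B (the rewrite author's own statement) =====
-- stated objective: alternative
-- what changed: A generates successive values of the quadratic form n*n+n+one and tests whether each divides num; B instead scans the divisor pairs of num up to its square root and tests whether a divisor has that quadratic form via binary search.
import Mathlib
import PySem

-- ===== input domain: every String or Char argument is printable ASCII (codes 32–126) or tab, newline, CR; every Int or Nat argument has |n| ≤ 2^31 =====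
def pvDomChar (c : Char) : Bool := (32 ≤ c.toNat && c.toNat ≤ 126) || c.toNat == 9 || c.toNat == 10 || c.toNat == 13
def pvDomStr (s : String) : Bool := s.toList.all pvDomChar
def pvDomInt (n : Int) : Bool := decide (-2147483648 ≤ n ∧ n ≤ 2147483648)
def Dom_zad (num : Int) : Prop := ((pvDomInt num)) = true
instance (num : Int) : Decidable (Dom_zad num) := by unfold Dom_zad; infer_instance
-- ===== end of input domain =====

-- B replaces A's generate-each-n²+n+1-and-test loop by a √num divisor scan with a
-- binary-search test of the n²+n+1 form (objective: alternative algorithm, similar cost).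

-- ===== PORT A =====
-- the while loop of A; fuel makes the recursion total, num.toNat+1 steps always suffice
def zadLoopA (num : Int) (fuel : Nat) (a n : Int) : Bool :=
  match fuel with
  | 0 => false
  | Nat.succ f =>
    if a ≤ num then
      if PySem.Int.mod num a == 0 then true
      else zadLoopA num f ((n+1)*(n+1)+(n+1)+1) (n+1)
    else false

def zad (num : Int) : Bool := zadLoopA num (num.toNat + 1) 3 1

-- ===== PORT B =====
-- _is_form's binary-search loop; fuel d.toNat+1 covers the initial interval [1,d]
def isFormLoop (d : Int) (fuel : Nat) (lo hi : Int) : Bool :=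
  match fuel with
  | 0 => false
  | Nat.succ f =>
    if lo ≤ hi then
      let mid := PySem.Int.floordiv (lo + hi) 2
      let v := mid*mid + mid + 1
      if v == d then true
      else if v < d then isFormLoop d f (mid+1) hi
      else isFormLoop d f lo (mid-1)
    else false

def isForm (d : Int) : Bool := isFormLoop d (d.toNat + 1) 1 d

-- the divisor-scan loop of B's zad
def divLoopB (num : Int) (fuel : Nat) (i : Int) : Bool :=
  match fuel with
  | 0 => false
  | Nat.succ f =>
    if i*i ≤ num then
      if PySem.Int.mod num i == 0 &&
         (isForm (PySem.Int.floordiv num i) || isForm i) then true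
      else divLoopB num f (i+1)
    else false

def zad_alt (num : Int) : Bool :=
  if num < 3 then false else divLoopB num (num.toNat + 1) 1

-- ===== PRECONDITION & SPEC =====
def Spec_zad (num : Int) (out : Bool) : Prop := out = zad_alt num
instance (num : Int) (out : Bool) : Decidable (Spec_zad num out) := by unfold Spec_zad; infer_instance

-- ===== CLAIM (what is proved, stated in full; the proofs are below) =====
def Claim_equal_zad : Prop := ∀ (num : Int), Dom_zad num → Spec_zad num (zad num)

-- ===== LEMMAS AND PROOFS =====

-- the common characterisation: num has a divisor of the form n²+n+1 (n ≥ 1) not exceeding num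
def HasForm (num : Int) : Prop := ∃ m : Int, 1 ≤ m ∧ m*m+m+1 ≤ num ∧ (m*m+m+1) ∣ num

theorem form_mono {a b : Int} (h1 : 0 ≤ a) (h : a ≤ b) : a*a+a+1 ≤ b*b+b+1 := by nlinarith

theorem zadLoopA_iff (num : Int) :
    ∀ (fuel : Nat) (n : Int), 1 ≤ n → num + 1 - n ≤ (fuel : Int) →
      (zadLoopA num fuel (n*n+n+1) n = true ↔
        ∃ m : Int, n ≤ m ∧ m*m+m+1 ≤ num ∧ (m*m+m+1) ∣ num) := by
  intro fuel
  induction fuel with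
  | zero =>
    intro n hn hf
    simp only [zadLoopA]
    constructor
    · intro h; cases h
    · rintro ⟨m, hm, hle, -⟩
      exfalso
      have : n*n+n+1 ≤ m*m+m+1 := form_mono (by omega) hm
      simp at hf
      nlinarith
  | succ f ih =>
    intro n hn hf
    rw [zadLoopA]
    by_cases hle : n*n+n+1 ≤ num
    · simp only [hle, if_true]
      by_cases hdvd : (n*n+n+1) ∣ num
      · have : PySem.Int.mod num (n*n+n+1) == 0 := by
          simp [(PySem.Int.mod_eq_zero_iff_dvd num (n*n+n+1)).mpr hdvd]
        simp only [this, if_true, true_iff]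
        exact ⟨n, le_refl n, hle, hdvd⟩
      · have : ¬ (PySem.Int.mod num (n*n+n+1) == 0) := by
          simpa [beq_iff_eq, PySem.Int.mod_eq_zero_iff_dvd] using hdvd
        simp only [this, Bool.false_eq_true, if_false]
        rw [ih (n+1) (by omega) (by push_cast at hf ⊢; omega)]
        constructor
        · rintro ⟨m, hm, h1, h2⟩; exact ⟨m, by omega, h1, h2⟩
        · rintro ⟨m, hm, h1, h2⟩
          rcases eq_or_lt_of_le hm with heq | hlt
          · exact absurd (heq ▸ h2) hdvd
          · exact ⟨m, by omega, h1, h2⟩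
    · simp only [hle, if_false, Bool.false_eq_true, false_iff]
      rintro ⟨m, hm, h1, -⟩
      have : n*n+n+1 ≤ m*m+m+1 := form_mono (by omega) hm
      omega

theorem zad_iff (num : Int) : zad num = true ↔ HasForm num := by
  have h := zadLoopA_iff num (num.toNat + 1) 1 (le_refl 1) (by push_cast; omega)
  unfold zad HasForm
  rw [show (3 : Int) = 1*1+1+1 by norm_num]
  simpa using h

theorem isFormLoop_iff (d : Int) :
    ∀ (fuel : Nat) (lo hi : Int), 1 ≤ lo → hi + 1 - lo ≤ (fuel : Int) →
      (isFormLoop d fuel lo hi = true ↔ ∃ n : Int, lo ≤ n ∧ n ≤ hi ∧ n*n+n+1 = d) := by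
  intro fuel
  induction fuel with
  | zero =>
    intro lo hi hlo hf
    simp only [isFormLoop, Bool.false_eq_true, false_iff]
    rintro ⟨n, h1, h2, -⟩
    simp at hf; omega
  | succ f ih =>
    intro lo hi hlo hf
    rw [isFormLoop]
    by_cases hle : lo ≤ hi
    · simp only [hle, if_true]
      obtain ⟨hm1, hm2⟩ := PySem.Int.floordiv_two_mid_bounds hle
      set mid := PySem.Int.floordiv (lo + hi) 2 with hmid
      by_cases heq : mid*mid + mid + 1 = d
      · simp only [heq, beq_self_eq_true, if_true, true_iff]
        exact ⟨mid, hm1, hm2, heq⟩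
      · have hne : ¬ (mid*mid + mid + 1 == d) := by simpa using heq
        simp only [hne, Bool.false_eq_true, if_false]
        by_cases hlt : mid*mid + mid + 1 < d
        · simp only [hlt, if_true]
          rw [ih (mid+1) hi (by omega) (by push_cast at hf ⊢; omega)]
          constructor
          · rintro ⟨n, h1, h2, h3⟩; exact ⟨n, by omega, h2, h3⟩
          · rintro ⟨n, h1, h2, h3⟩
            refine ⟨n, ?_, h2, h3⟩
            by_contra hcon
            have hnm : n ≤ mid := by omega
            have : n*n+n+1 ≤ mid*mid+mid+1 := form_mono (by omega) hnm
            omega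
        · simp only [hlt, if_false]
          rw [ih lo (mid-1) hlo (by push_cast at hf ⊢; omega)]
          constructor
          · rintro ⟨n, h1, h2, h3⟩; exact ⟨n, h1, by omega, h3⟩
          · rintro ⟨n, h1, h2, h3⟩
            refine ⟨n, h1, ?_, h3⟩
            by_contra hcon
            have hnm : mid ≤ n := by omega
            have : mid*mid+mid+1 ≤ n*n+n+1 := form_mono (by omega) hnm
            omega
    · simp only [hle, if_false, Bool.false_eq_true, false_iff]
      rintro ⟨n, h1, h2, -⟩; omega

theorem isForm_iff (d : Int) : isForm d = true ↔ ∃ n : Int, 1 ≤ n ∧ n*n+n+1 = d := by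
  unfold isForm
  rw [isFormLoop_iff d (d.toNat + 1) 1 d (le_refl 1) (by push_cast; omega)]
  constructor
  · rintro ⟨n, h1, h2, h3⟩; exact ⟨n, h1, h3⟩
  · rintro ⟨n, h1, h3⟩
    refine ⟨n, h1, ?_, h3⟩
    nlinarith

theorem divLoopB_iff (num : Int) (hnum : 3 ≤ num) :
    ∀ (fuel : Nat) (i : Int), 1 ≤ i → num + 1 - i ≤ (fuel : Int) →
      (divLoopB num fuel i = true ↔
        ∃ j : Int, i ≤ j ∧ j*j ≤ num ∧ j ∣ num ∧
          ((∃ n : Int, 1 ≤ n ∧ n*n+n+1 = PySem.Int.floordiv num j) ∨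
           (∃ n : Int, 1 ≤ n ∧ n*n+n+1 = j))) := by
  intro fuel
  induction fuel with
  | zero =>
    intro i hi hf
    simp only [divLoopB, Bool.false_eq_true, false_iff]
    rintro ⟨j, h1, h2, -⟩
    simp at hf
    nlinarith
  | succ f ih =>
    intro i hi hf
    rw [divLoopB]
    by_cases hle : i*i ≤ num
    · simp only [hle, if_true]
      by_cases hcond : (PySem.Int.mod num i == 0 &&
          (isForm (PySem.Int.floordiv num i) || isForm i)) = true
      · rw [if_pos hcond]; simp only [true_iff]
        rw [Bool.and_eq_true, Bool.or_eq_true, beq_iff_eq] at hcond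
        obtain ⟨hmod, hforms⟩ := hcond
        have hdvd : i ∣ num := (PySem.Int.mod_eq_zero_iff_dvd num i).mp hmod
        refine ⟨i, le_refl i, hle, hdvd, ?_⟩
        rcases hforms with hf1 | hf2
        · exact Or.inl ((isForm_iff _).mp hf1)
        · exact Or.inr ((isForm_iff _).mp hf2)
      · rw [if_neg (by simpa using hcond)]
        rw [ih (i+1) (by omega) (by push_cast at hf ⊢; omega)]
        constructor
        · rintro ⟨j, h1, h2, h3, h4⟩; exact ⟨j, by omega, h2, h3, h4⟩
        · rintro ⟨j, h1, h2, h3, h4⟩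
          rcases eq_or_lt_of_le h1 with heq | hlt
          · exfalso
            apply hcond
            rw [Bool.and_eq_true, Bool.or_eq_true, beq_iff_eq]
            rw [heq]
            refine ⟨(PySem.Int.mod_eq_zero_iff_dvd num j).mpr h3, ?_⟩
            rcases h4 with h | h
            · exact Or.inl ((isForm_iff _).mpr h)
            · exact Or.inr ((isForm_iff _).mpr h)
          · exact ⟨j, by omega, h2, h3, h4⟩
    · simp only [hle, if_false, Bool.false_eq_true, false_iff]
      rintro ⟨j, h1, h2, -⟩
      nlinarith

theorem zad_alt_iff (num : Int) : zad_alt num = true ↔ HasForm num := by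
  unfold zad_alt
  by_cases hnum : num < 3
  · simp only [hnum, if_true, Bool.false_eq_true, false_iff]
    rintro ⟨m, h1, h2, -⟩
    nlinarith
  · push_neg at hnum
    rw [if_neg (by omega : ¬ num < 3)]
    rw [divLoopB_iff num hnum (num.toNat + 1) 1 (le_refl 1) (by push_cast; omega)]
    unfold HasForm
    constructor
    · rintro ⟨j, hj1, hj2, hj3, hform⟩
      have hjpos : 0 < j := by omega
      rcases hform with ⟨n, hn, heq⟩ | ⟨n, hn, heq⟩
      · -- the cofactor num/j is of the form
        have hfd : PySem.Int.floordiv num j = num / j :=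
          PySem.Int.floordiv_eq_ediv_of_pos hjpos
        have hmul : num / j * j = num := Int.ediv_mul_cancel hj3
        refine ⟨n, hn, ?_, ?_⟩
        · rw [heq, hfd]
          nlinarith [hmul, hjpos]
        · rw [heq, hfd]
          exact ⟨j, hmul.symm⟩
      · exact ⟨n, hn, by rw [heq]; nlinarith, heq ▸ hj3⟩
    · rintro ⟨m, hm, hle, hdvd⟩
      set a := m*m+m+1 with ha
      have hapos : 0 < a := by nlinarith
      obtain ⟨k, hk⟩ := hdvd
      have hkpos : 0 < k := by nlinarith
      by_cases hak : a ≤ k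
      · -- a itself is the small divisor
        refine ⟨a, by nlinarith, by nlinarith, ⟨k, hk⟩, Or.inr ⟨m, hm, rfl⟩⟩
      · -- k is the small divisor and num/k = a
        rw [not_le] at hak
        have hfd : PySem.Int.floordiv num k = num / k :=
          PySem.Int.floordiv_eq_ediv_of_pos hkpos
        have hdivk : num / k = a := by
          rw [hk, mul_comm a k, Int.mul_ediv_cancel_left a (by omega)]
        refine ⟨k, hkpos, by nlinarith, ?_, Or.inl ?_⟩
        · exact ⟨a, by rw [hk, mul_comm]⟩
        · exact ⟨m, hm, by rw [hfd, hdivk]⟩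

-- ===== VERDICT (by name: the statement is the Claim_ definition above) =====
theorem zad_spec : Claim_equal_zad := by
  intro num _
  unfold Spec_zad
  have h1 := zad_iff num
  have h2 := zad_alt_iff num
  cases hA : zad num <;> cases hB : zad_alt num <;> simp_all
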